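-- pv_equiv track=rewrite | github.com/Olabisi-Balogun/Clustering-Validation | nmi.py | get_ground_dict
-- ===== SOURCE A (Python) =====
-- def get_ground_dict(label1, label2):
--     #label1.sort()
--     #label2.sort()
--     n_ground = len(set(label1))
--     n_pred = len(set(label2))
--     ground_dict = {}
--     merged_label = tuple(zip(label1, label2))
--
--     for i in range(n_ground):
--         count_label = 0
--         for j in range(n_pred):
--             if(str(i),str(j)) in merged_label:
--                 count = merged_label.count((str(i),str(j)))
--                 count_label+=count
--         ground_dict[str(i)] = count_label
--
--     return ground_dict
-- ===== SOURCE B (Python) =====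
-- def get_ground_dict(label1, label2):
--     n_ground = len(set(label1))
--     n_pred = len(set(label2))
--     ground = {str(i): 0 for i in range(n_ground)}
--     pred = {str(j) for j in range(n_pred)}
--     for a, b in zip(label1, label2):
--         if a in ground and b in pred:
--             ground[a] += 1
--     return ground
-- ===== Notes on version B (the rewrite author's own statement) =====
-- stated objective: faster
-- what changed: Replaced the nested candidate-label loops with repeated tuple.count scans by one accumulating pass over zip(label1,label2) into a pre-initialised counter dict, gated on membership in the precomputed ground keys and predicted-label set.
import Mathlib
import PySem

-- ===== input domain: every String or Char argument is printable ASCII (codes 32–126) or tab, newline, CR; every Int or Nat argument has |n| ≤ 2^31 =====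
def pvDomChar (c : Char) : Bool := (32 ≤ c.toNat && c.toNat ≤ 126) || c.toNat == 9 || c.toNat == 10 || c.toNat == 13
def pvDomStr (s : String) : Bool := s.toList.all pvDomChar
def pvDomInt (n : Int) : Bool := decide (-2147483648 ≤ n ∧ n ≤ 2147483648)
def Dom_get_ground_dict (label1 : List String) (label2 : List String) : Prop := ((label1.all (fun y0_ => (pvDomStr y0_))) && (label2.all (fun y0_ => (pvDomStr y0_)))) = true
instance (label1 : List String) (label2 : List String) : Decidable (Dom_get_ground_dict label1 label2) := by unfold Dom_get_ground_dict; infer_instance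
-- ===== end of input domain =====

-- B replaces A's nested candidate-label loops (with repeated tuple.count scans) by one
-- accumulating pass over the zipped pairs into a pre-initialised counter dict; objective: faster.

-- ===== PORT A =====
def get_ground_dict (label1 : List String) (label2 : List String) : List (String × Int) :=
  let n_ground : Int := PySem.Set.len (PySem.Set.ofList label1)
  let n_pred : Int := PySem.Set.len (PySem.Set.ofList label2)
  let merged := label1.zip label2
  let ground_dict : PySem.Dict String Int :=
    (PySem.List.pyRange 0 n_ground 1).foldl (fun d i =>
      let count_label : Int :=
        (PySem.List.pyRange 0 n_pred 1).foldl (fun cl j =>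
          if (PySem.Int.toStr i, PySem.Int.toStr j) ∈ merged then
            cl + (PySem.List.count merged (PySem.Int.toStr i, PySem.Int.toStr j) : Int)
          else cl) 0
      d.insert (PySem.Int.toStr i) count_label) PySem.Dict.empty
  ground_dict.items

-- ===== PORT B =====
def get_ground_dict_alt (label1 : List String) (label2 : List String) : List (String × Int) :=
  let n_ground : Int := PySem.Set.len (PySem.Set.ofList label1)
  let n_pred : Int := PySem.Set.len (PySem.Set.ofList label2)
  let ground : PySem.Dict String Int :=
    (PySem.List.pyRange 0 n_ground 1).foldl (fun d i => d.insert (PySem.Int.toStr i) 0) PySem.Dict.empty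
  let pred : PySem.Set String :=
    PySem.Set.ofList ((PySem.List.pyRange 0 n_pred 1).map (fun j => PySem.Int.toStr j))
  let final := (label1.zip label2).foldl (fun d p =>
      if d.contains p.1 && PySem.Set.contains pred p.2 then d.modify p.1 0 (· + 1) else d) ground
  final.items

-- ===== PRECONDITION & SPEC =====
def Spec_get_ground_dict (label1 : List String) (label2 : List String) (out : List (String × Int)) : Prop := out = get_ground_dict_alt label1 label2
instance (label1 : List String) (label2 : List String) (out : List (String × Int)) : Decidable (Spec_get_ground_dict label1 label2 out) := by unfold Spec_get_ground_dict; infer_instance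

-- ===== CLAIM (what is proved, stated in full; the proofs are below) =====
def Claim_equal_get_ground_dict : Prop := ∀ (label1 : List String) (label2 : List String), Dom_get_ground_dict label1 label2 → Spec_get_ground_dict label1 label2 (get_ground_dict label1 label2)

-- ===== LEMMAS AND PROOFS =====

theorem pv_digitChar_inj (a b : Nat) (ha : a < 10) (hb : b < 10)
    (h : Nat.digitChar a = Nat.digitChar b) : a = b := by
  interval_cases a <;> interval_cases b <;> revert h <;> decide

theorem pv_toDigits10_inj (a : Nat) : ∀ b, Nat.toDigits 10 a = Nat.toDigits 10 b → a = b := by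
  induction a using Nat.strong_induction_on with
  | _ a ih =>
    intro b h
    by_cases ha : a < 10 <;> by_cases hb : b < 10
    · rw [Nat.toDigits_of_lt_base ha, Nat.toDigits_of_lt_base hb] at h
      exact pv_digitChar_inj a b ha hb (List.cons_eq_cons.mp h).1
    · exfalso
      have h1 : (Nat.toDigits 10 a).length ≤ 1 :=
        (Nat.length_toDigits_le_iff (by norm_num) (by norm_num)).mpr (by simpa using ha)
      have h2 : (Nat.toDigits 10 b).length ≤ 1 := by rw [← h]; exact h1
      exact hb ((by simpa using (Nat.length_toDigits_le_iff (by norm_num) (by norm_num)).mp h2))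
    · exfalso
      have h1 : (Nat.toDigits 10 b).length ≤ 1 :=
        (Nat.length_toDigits_le_iff (by norm_num) (by norm_num)).mpr (by simpa using hb)
      have h2 : (Nat.toDigits 10 a).length ≤ 1 := by rw [h]; exact h1
      exact ha ((by simpa using (Nat.length_toDigits_le_iff (by norm_num) (by norm_num)).mp h2))
    · have hma : a % 10 < 10 := Nat.mod_lt _ (by norm_num)
      have hmb : b % 10 < 10 := Nat.mod_lt _ (by norm_num)
      have hda : Nat.toDigits 10 (a / 10) ++ [Nat.digitChar (a % 10)] = Nat.toDigits 10 a := by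
        have := Nat.toDigits_append_toDigits (b := 10) (n := a / 10) (d := a % 10)
          (by norm_num) (by omega) hma
        rw [Nat.toDigits_of_lt_base hma] at this
        rw [this]; congr 1; omega
      have hdb : Nat.toDigits 10 (b / 10) ++ [Nat.digitChar (b % 10)] = Nat.toDigits 10 b := by
        have := Nat.toDigits_append_toDigits (b := 10) (n := b / 10) (d := b % 10)
          (by norm_num) (by omega) hmb
        rw [Nat.toDigits_of_lt_base hmb] at this
        rw [this]; congr 1; omega
      rw [← hda, ← hdb, ← List.concat_eq_append, ← List.concat_eq_append] at h
      obtain ⟨h1, h2⟩ := List.concat_inj.mp h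
      have e1 : a / 10 = b / 10 := ih (a / 10) (by omega) _ h1
      have e2 : a % 10 = b % 10 := pv_digitChar_inj _ _ hma hmb h2
      omega

theorem pv_toStr_inj_nonneg {a b : Int} (ha : 0 ≤ a) (hb : 0 ≤ b)
    (h : PySem.Int.toStr a = PySem.Int.toStr b) : a = b := by
  have h' : PySem.Int.toChars a = PySem.Int.toChars b := by
    rw [← PySem.Int.toList_toStr, ← PySem.Int.toList_toStr, h]
  unfold PySem.Int.toChars at h'
  rw [if_neg (by omega), if_neg (by omega)] at h'
  have := pv_toDigits10_inj _ _ h'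
  omega

theorem pv_nodup_map_toStr_range (n : Int) :
    ((PySem.List.pyRange 0 n 1).map PySem.Int.toStr).Nodup := by
  refine List.Nodup.map_on ?_ (PySem.List.nodup_pyRange_one 0 n)
  intro x hx y hy h
  exact pv_toStr_inj_nonneg (PySem.List.mem_pyRange_one.mp hx).1
    (PySem.List.mem_pyRange_one.mp hy).1 h

theorem pv_set_contains_decide (s : List String) (x : String) :
    PySem.Set.contains s x = decide (x ∈ s) := by
  by_cases h : x ∈ s
  · simp [(PySem.Set.contains_iff s x).mpr h]
  · simp only [h, decide_false]
    cases hc : PySem.Set.contains s x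
    · rfl
    · exact absurd ((PySem.Set.contains_iff s x).mp hc) h

set_option maxRecDepth 4096 in
theorem pv_countP_cons_key (m : List (String × String)) (si s : String) (t : List String)
    (hs : s ∉ t) :
    m.countP (fun p => p.1 == si && decide (p.2 ∈ s :: t))
      = m.count (si, s) + m.countP (fun p => p.1 == si && decide (p.2 ∈ t)) := by
  induction m with
  | nil => simp
  | cons q m ih =>
    obtain ⟨q1, q2⟩ := q
    simp only [List.countP_cons, List.count_cons, ih]
    beta_reduce
    have key : (if (q1 == si && decide (q2 ∈ s :: t)) = true then 1 else 0)
        = (if ((q1, q2) == (si, s)) = true then 1 else 0)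
          + (if (q1 == si && decide (q2 ∈ t)) = true then 1 else 0) := by
      by_cases h1 : q1 = si
      · by_cases h2 : q2 = s
        · have h3 : q2 ∉ t := by rw [h2]; exact hs
          simp [h1, h2]
          exact hs
        · simp [h1, h2]
      · simp [h1]
    rw [key]
    omega

theorem pv_inner_fold (m : List (String × String)) (si : String) :
    ∀ (js : List Int), (js.map PySem.Int.toStr).Nodup → ∀ (acc : Int),
    js.foldl (fun cl j =>
        if (si, PySem.Int.toStr j) ∈ m then
          cl + (PySem.List.count m (si, PySem.Int.toStr j) : Int)
        else cl) acc
      = acc + (m.countP (fun p => p.1 == si && decide (p.2 ∈ js.map PySem.Int.toStr)) : Int) := by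
  intro js
  induction js with
  | nil => intro _ acc; simp
  | cons j t ih =>
    intro hnd acc
    have hs : PySem.Int.toStr j ∉ t.map PySem.Int.toStr := (List.nodup_cons.mp hnd).1
    simp only [List.foldl_cons]
    rw [ih (List.nodup_cons.mp hnd).2]
    have hstep : (if (si, PySem.Int.toStr j) ∈ m then
          acc + (PySem.List.count m (si, PySem.Int.toStr j) : Int) else acc)
        = acc + (m.count (si, PySem.Int.toStr j) : Int) := by
      split_ifs with h
      · rfl
      · simp [List.count_eq_zero.mpr h]
    rw [hstep, List.map_cons, pv_countP_cons_key m si (PySem.Int.toStr j) (t.map PySem.Int.toStr) hs]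
    push_cast
    ring

theorem pv_keys_bfold (pred : PySem.Set String) :
    ∀ (l : List (String × String)) (d : PySem.Dict String Int),
    (l.foldl (fun d p =>
        if d.contains p.1 && PySem.Set.contains pred p.2 then d.modify p.1 0 (· + 1) else d) d).keys
      = d.keys := by
  intro l
  induction l with
  | nil => intro d; rfl
  | cons p l ih =>
    intro d
    simp only [List.foldl_cons]
    rw [ih]
    by_cases hc : (d.contains p.1 && PySem.Set.contains pred p.2) = true
    · rw [if_pos hc, PySem.Dict.keys_modify,
        PySem.Dict.keys_insert_of_contains _ _ (Bool.and_eq_true_iff.mp hc).1]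
    · rw [if_neg hc]

theorem pv_getD_bfold (pred : PySem.Set String) :
    ∀ (l : List (String × String)) (d : PySem.Dict String Int) (k : String),
    (l.foldl (fun d p =>
        if d.contains p.1 && PySem.Set.contains pred p.2 then d.modify p.1 0 (· + 1) else d) d).getD k 0
      = d.getD k 0 + (if d.contains k = true then
          (l.countP (fun p => p.1 == k && pred.contains p.2) : Int) else 0) := by
  intro l
  induction l with
  | nil => intro d k; simp
  | cons p l ih =>
    intro d k
    simp only [List.foldl_cons, List.countP_cons]
    by_cases hc : (d.contains p.1 && PySem.Set.contains pred p.2) = true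
    · rw [if_pos hc, ih]
      obtain ⟨hc1, hc2⟩ := Bool.and_eq_true_iff.mp hc
      rw [PySem.Dict.contains_modify, PySem.Dict.getD_modify]
      by_cases hk : k = p.1
      · subst hk
        have hm : p.2 ∈ pred := (PySem.Set.contains_iff pred p.2).mp hc2
        simp [hc1, hm]
        omega
      · rw [if_neg hk]
        have h1 : (k == p.1 || d.contains k) = d.contains k := by simp [hk]
        have h2 : ((p.1 == k) && pred.contains p.2) = false := by simp [Ne.symm hk]
        rw [h1, h2]
        simp
    · rw [if_neg hc, ih]
      by_cases hk : d.contains k = true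
      · have hp : ((p.1 == k) && pred.contains p.2) = false := by
          cases hpred : pred.contains p.2
          · simp
          · by_cases hpk : p.1 = k
            · exact absurd (by rw [Bool.and_eq_true]; exact ⟨hpk ▸ hk, hpred⟩) hc
            · simp [hpk]
        rw [if_pos hk, if_pos hk, hp]
        simp
      · simp [hk]

theorem pv_keys_eq_items_fst {κ ν : Type} [BEq κ] (d : PySem.Dict κ ν) :
    d.keys = d.items.map (·.1) := rfl

-- ===== VERDICT (by name: the statement is the Claim_ definition above) =====
theorem get_ground_dict_spec : Claim_equal_get_ground_dict := by
  intro label1 label2 _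
  unfold Spec_get_ground_dict get_ground_dict get_ground_dict_alt
  simp only []
  rw [PySem.Set.ofList_eq_self_of_nodup
    ((PySem.List.pyRange 0 (PySem.Set.len (PySem.Set.ofList label2)) 1).map (fun j => PySem.Int.toStr j))
    (pv_nodup_map_toStr_range _)]
  have hndR := pv_nodup_map_toStr_range (PySem.Set.len (PySem.Set.ofList label1))
  have hndP := pv_nodup_map_toStr_range (PySem.Set.len (PySem.Set.ofList label2))
  -- A's dict: a loop of inserts at fresh distinct keys appends
  rw [PySem.Dict.items_foldl_insert_fresh
    (PySem.List.pyRange 0 (PySem.Set.len (PySem.Set.ofList label1)) 1)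
    (fun i => PySem.Int.toStr i)
    (fun i => (PySem.List.pyRange 0 (PySem.Set.len (PySem.Set.ofList label2)) 1).foldl (fun cl j =>
          if (PySem.Int.toStr i, PySem.Int.toStr j) ∈ label1.zip label2 then
            cl + (PySem.List.count (label1.zip label2) (PySem.Int.toStr i, PySem.Int.toStr j) : Int)
          else cl) 0)
    PySem.Dict.empty (fun a _ => PySem.Dict.contains_empty _) hndR]
  -- B's initial dict likewise
  have hG : ((PySem.List.pyRange 0 (PySem.Set.len (PySem.Set.ofList label1)) 1).foldl
      (fun d i => d.insert (PySem.Int.toStr i) 0) (PySem.Dict.empty : PySem.Dict String Int)).items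
      = (PySem.List.pyRange 0 (PySem.Set.len (PySem.Set.ofList label1)) 1).map
          (fun i => (PySem.Int.toStr i, (0 : Int))) :=
    PySem.Dict.items_foldl_insert_fresh _ (fun i => PySem.Int.toStr i) (fun _ => (0 : Int))
      PySem.Dict.empty (fun a _ => PySem.Dict.contains_empty _) hndR
  set G := (PySem.List.pyRange 0 (PySem.Set.len (PySem.Set.ofList label1)) 1).foldl
      (fun d i => d.insert (PySem.Int.toStr i) 0) (PySem.Dict.empty : PySem.Dict String Int) with hGdef
  set ps := (PySem.List.pyRange 0 (PySem.Set.len (PySem.Set.ofList label2)) 1).map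
      (fun j => PySem.Int.toStr j) with hpsdef
  have hGkeys : G.keys = (PySem.List.pyRange 0 (PySem.Set.len (PySem.Set.ofList label1)) 1).map
      PySem.Int.toStr := by
    rw [pv_keys_eq_items_fst, hG, List.map_map]
    rfl
  have hGnodup : G.keys.Nodup := by rw [hGkeys]; exact hndR
  have hFk := pv_keys_bfold ps (label1.zip label2) G
  have hFnodup : ((label1.zip label2).foldl (fun d p =>
      if d.contains p.1 && PySem.Set.contains ps p.2 then d.modify p.1 0 (· + 1) else d) G).keys.Nodup := by
    rw [hFk]; exact hGnodup
  rw [PySem.Dict.items_eq_map_keys _ hFnodup 0, hFk, hGkeys, List.map_map,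
    show (PySem.Dict.empty : PySem.Dict String Int).items = [] from rfl, List.nil_append]
  refine List.map_congr_left ?_
  intro i hi
  simp only [Function.comp]
  have hcG : G.contains (PySem.Int.toStr i) = true :=
    (PySem.Dict.contains_iff_mem_keys G _).mpr (by rw [hGkeys]; exact List.mem_map_of_mem hi)
  have hg0 : G.getD (PySem.Int.toStr i) 0 = 0 :=
    PySem.Dict.getD_of_mem_items G (by rw [hG]; exact List.mem_map_of_mem hi) hGnodup 0
  have hB := pv_getD_bfold ps (label1.zip label2) G (PySem.Int.toStr i)
  rw [hcG, if_pos rfl, hg0, zero_add] at hB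
  rw [hB]
  have hA := pv_inner_fold (label1.zip label2) (PySem.Int.toStr i)
    (PySem.List.pyRange 0 (PySem.Set.len (PySem.Set.ofList label2)) 1) hndP 0
  rw [hA, zero_add]
  have hcong : List.countP (fun p => p.1 == PySem.Int.toStr i && decide (p.2 ∈ ps)) (label1.zip label2)
      = List.countP (fun p => p.1 == PySem.Int.toStr i && PySem.Set.contains ps p.2) (label1.zip label2) := by
    apply List.countP_congr
    intro p _
    rw [pv_set_contains_decide]
  rw [hpsdef] at hcong
  rw [hcong]
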